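-- pv_equiv track=rewrite | github.com/MahmoudUwk/Open_sub | src/srt_validate.py | validate_entries
-- ===== SOURCE A (Python) =====
-- from typing import List, Tuple, Dict
--
-- def validate_entries(entries: List[Tuple[int,int,str]],
--                      max_duration_ms: int = 20*1000) -> Dict[str, List[int]]:
--     issues: Dict[str, List[int]] = {
--         'non_monotonic': [],
--         'overlap': [],
--         'negative_or_zero': [],
--         'too_long': [],
--         'empty_text': [],
--     }
--     prev_end = -1
--     for i,(s,e,t) in enumerate(entries):
--         if s >= e:
--             issues['negative_or_zero'].append(i)
--         if prev_end > s:
--             issues['overlap'].append(i)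
--         if s < prev_end:
--             issues['non_monotonic'].append(i)
--         if (e - s) > max_duration_ms:
--             issues['too_long'].append(i)
--         if not t.strip():
--             issues['empty_text'].append(i)
--         prev_end = max(prev_end, e)
--     return issues
-- ===== SOURCE B (Python) =====
-- def validate_entries(entries, max_duration_ms=20*1000):
--     # prefix maximum of end times strictly before each index, seeded with -1
--     pm = []
--     m = -1
--     for _, e, _ in entries:
--         pm.append(m)
--         m = max(m, e)
--     pairs = list(zip(entries, pm))
--     return {
--         'non_monotonic': [i for i, ((s, _, _), p) in enumerate(pairs) if s < p],
--         'overlap': [i for i, ((s, _, _), p) in enumerate(pairs) if p > s],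
--         'negative_or_zero': [i for i, ((s, e, _), _) in enumerate(pairs) if s >= e],
--         'too_long': [i for i, ((s, e, _), _) in enumerate(pairs) if e - s > max_duration_ms],
--         'empty_text': [i for i, ((_, _, t), _) in enumerate(pairs) if not t.strip()],
--     }
-- ===== Notes on version B (the rewrite author's own statement) =====
-- stated objective: alternative
-- what changed: Replaced the single stateful loop that mutates a dict and carries prev_end by a precomputed prefix-maximum-of-ends list followed by five independent list comprehensions, one per issue kind.
import Mathlib
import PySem

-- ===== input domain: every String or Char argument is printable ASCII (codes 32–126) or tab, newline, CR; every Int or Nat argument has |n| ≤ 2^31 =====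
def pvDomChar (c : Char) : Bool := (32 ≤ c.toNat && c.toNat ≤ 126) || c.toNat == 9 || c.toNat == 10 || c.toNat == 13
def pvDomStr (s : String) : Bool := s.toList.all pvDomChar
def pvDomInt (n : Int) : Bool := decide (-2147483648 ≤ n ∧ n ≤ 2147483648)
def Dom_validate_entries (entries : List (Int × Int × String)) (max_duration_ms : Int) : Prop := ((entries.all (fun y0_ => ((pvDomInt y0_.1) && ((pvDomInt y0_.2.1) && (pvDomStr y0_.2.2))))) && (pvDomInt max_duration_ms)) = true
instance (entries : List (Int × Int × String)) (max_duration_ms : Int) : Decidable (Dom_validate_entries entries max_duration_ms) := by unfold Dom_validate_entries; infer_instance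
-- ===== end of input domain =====

-- B replaces A's single stateful dict-mutating loop by a prefix-maximum-of-ends list plus five
-- independent comprehensions (alternative decomposition, same O(n) cost).


-- ===== PORT A =====
-- literal port of A: a dict of five issue lists, one pass carrying prev_end, append via modify
def validate_entries (entries : List (Int × Int × String)) (max_duration_ms : Int) : List (String × List Int) :=
  let issues : PySem.Dict String (List Int) :=
    ((((PySem.Dict.empty.insert "non_monotonic" ([] : List Int)).insert "overlap" []).insert
        "negative_or_zero" []).insert "too_long" []).insert "empty_text" []
  let r := (PySem.List.enumerate entries).foldl
    (fun (st : PySem.Dict String (List Int) × Int) q =>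
      let i := q.1; let s := q.2.1; let e := q.2.2.1; let t := q.2.2.2
      let d := st.1; let prev_end := st.2
      let d := if s ≥ e then d.modify "negative_or_zero" [] (· ++ [i]) else d
      let d := if prev_end > s then d.modify "overlap" [] (· ++ [i]) else d
      let d := if s < prev_end then d.modify "non_monotonic" [] (· ++ [i]) else d
      let d := if e - s > max_duration_ms then d.modify "too_long" [] (· ++ [i]) else d
      let d := if PySem.Str.strip t == "" then d.modify "empty_text" [] (· ++ [i]) else d
      (d, max prev_end e))
    (issues, -1)
  r.1.items

-- ===== PORT B =====
-- literal port of B: pm = prefix max of ends (seeded -1), then five filters over enumerate(zip entries pm)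
def validate_entries_alt (entries : List (Int × Int × String)) (max_duration_ms : Int) : List (String × List Int) :=
  let pm := (entries.foldl (fun (acc : List Int × Int) x => (acc.1 ++ [acc.2], max acc.2 x.2.1)) ([], -1)).1
  let pairs := entries.zip pm
  [("non_monotonic", ((PySem.List.enumerate pairs).filter (fun q => decide (q.2.1.1 < q.2.2))).map (·.1)),
   ("overlap", ((PySem.List.enumerate pairs).filter (fun q => decide (q.2.2 > q.2.1.1))).map (·.1)),
   ("negative_or_zero", ((PySem.List.enumerate pairs).filter (fun q => decide (q.2.1.1 ≥ q.2.1.2.1))).map (·.1)),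
   ("too_long", ((PySem.List.enumerate pairs).filter (fun q => decide (q.2.1.2.1 - q.2.1.1 > max_duration_ms))).map (·.1)),
   ("empty_text", ((PySem.List.enumerate pairs).filter (fun q => PySem.Str.strip q.2.1.2.2 == "")).map (·.1))]

-- ===== PRECONDITION & SPEC =====
def Spec_validate_entries (entries : List (Int × Int × String)) (max_duration_ms : Int) (out : List (String × List Int)) : Prop := out = validate_entries_alt entries max_duration_ms
instance (entries : List (Int × Int × String)) (max_duration_ms : Int) (out : List (String × List Int)) : Decidable (Spec_validate_entries entries max_duration_ms out) := by unfold Spec_validate_entries; infer_instance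

-- ===== CLAIM (what is proved, stated in full; the proofs are below) =====
def Claim_equal_validate_entries : Prop := ∀ (entries : List (Int × Int × String)) (max_duration_ms : Int), Dom_validate_entries entries max_duration_ms → Spec_validate_entries entries max_duration_ms (validate_entries entries max_duration_ms)

-- ===== LEMMAS AND PROOFS =====

-- the five-key dict A maintains, as a literal
def mkD (nm ov nz tl et : List Int) : PySem.Dict String (List Int) :=
  PySem.Dict.mk [("non_monotonic", nm), ("overlap", ov), ("negative_or_zero", nz), ("too_long", tl), ("empty_text", et)]

-- prefix maxima of end times, seeded with p
def pmRec (p : Int) : List (Int × Int × String) → List Int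
  | [] => []
  | x :: xs => p :: pmRec (max p x.2.1) xs

-- the five issue lists of an enumerated suffix, given the running prefix max p
def specs (mx : Int) : List (Int × (Int × Int × String)) → Int → List Int × List Int × List Int × List Int × List Int
  | [], _ => ([], [], [], [], [])
  | q :: rest, p =>
    let r := specs mx rest (max p q.2.2.1)
    ((if q.2.1 < p then q.1 :: r.1 else r.1),
     (if p > q.2.1 then q.1 :: r.2.1 else r.2.1),
     (if q.2.1 ≥ q.2.2.1 then q.1 :: r.2.2.1 else r.2.2.1),
     (if q.2.2.1 - q.2.1 > mx then q.1 :: r.2.2.2.1 else r.2.2.2.1),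
     (if PySem.Str.strip q.2.2.2 == "" then q.1 :: r.2.2.2.2 else r.2.2.2.2))

-- A's loop body as a named function (definitionally the lambda in validate_entries)
def stepA (mx : Int) (st : PySem.Dict String (List Int) × Int) (q : Int × (Int × Int × String)) :
    PySem.Dict String (List Int) × Int :=
  let i := q.1; let s := q.2.1; let e := q.2.2.1; let t := q.2.2.2
  let d := st.1; let prev_end := st.2
  let d := if s ≥ e then d.modify "negative_or_zero" [] (· ++ [i]) else d
  let d := if prev_end > s then d.modify "overlap" [] (· ++ [i]) else d
  let d := if s < prev_end then d.modify "non_monotonic" [] (· ++ [i]) else d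
  let d := if e - s > mx then d.modify "too_long" [] (· ++ [i]) else d
  let d := if PySem.Str.strip t == "" then d.modify "empty_text" [] (· ++ [i]) else d
  (d, max prev_end e)

lemma stepA_eq (mx : Int) (a b c d e : List Int) (p i s e' : Int) (t : String) :
    stepA mx (mkD a b c d e, p) (i, (s, e', t))
      = (mkD (if s < p then a ++ [i] else a) (if p > s then b ++ [i] else b)
             (if s ≥ e' then c ++ [i] else c) (if e' - s > mx then d ++ [i] else d)
             (if PySem.Str.strip t == "" then e ++ [i] else e), max p e') := by
  simp only [stepA, gt_iff_lt]
  split_ifs <;> rfl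

lemma loopA_eq (mx : Int) (l : List (Int × (Int × Int × String))) :
    ∀ (p : Int) (a b c d e : List Int),
    (l.foldl
      (fun (st : PySem.Dict String (List Int) × Int) q =>
        let i := q.1; let s := q.2.1; let e := q.2.2.1; let t := q.2.2.2
        let d := st.1; let prev_end := st.2
        let d := if s ≥ e then d.modify "negative_or_zero" [] (· ++ [i]) else d
        let d := if prev_end > s then d.modify "overlap" [] (· ++ [i]) else d
        let d := if s < prev_end then d.modify "non_monotonic" [] (· ++ [i]) else d
        let d := if e - s > mx then d.modify "too_long" [] (· ++ [i]) else d
        let d := if PySem.Str.strip t == "" then d.modify "empty_text" [] (· ++ [i]) else d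
        (d, max prev_end e))
      (mkD a b c d e, p)).1
    = mkD (a ++ (specs mx l p).1) (b ++ (specs mx l p).2.1) (c ++ (specs mx l p).2.2.1)
          (d ++ (specs mx l p).2.2.2.1) (e ++ (specs mx l p).2.2.2.2) := by
  rw [show (fun (st : PySem.Dict String (List Int) × Int) q =>
      let i := q.1; let s := q.2.1; let e := q.2.2.1; let t := q.2.2.2
      let d := st.1; let prev_end := st.2
      let d := if s ≥ e then d.modify "negative_or_zero" [] (· ++ [i]) else d
      let d := if prev_end > s then d.modify "overlap" [] (· ++ [i]) else d
      let d := if s < prev_end then d.modify "non_monotonic" [] (· ++ [i]) else d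
      let d := if e - s > mx then d.modify "too_long" [] (· ++ [i]) else d
      let d := if PySem.Str.strip t == "" then d.modify "empty_text" [] (· ++ [i]) else d
      (d, max prev_end e)) = stepA mx from rfl]
  induction l with
  | nil => intro p a b c d e; simp [specs]
  | cons q rest ih =>
    intro p a b c d e
    obtain ⟨i, s, e', t⟩ := q
    rw [List.foldl_cons, stepA_eq, ih]
    simp only [specs]
    split_ifs <;> simp [mkD]

lemma pm_fold (l : List (Int × Int × String)) :
    ∀ (acc : List Int) (p : Int),
    l.foldl (fun (acc : List Int × Int) x => (acc.1 ++ [acc.2], max acc.2 x.2.1)) (acc, p)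
      = (acc ++ pmRec p l, l.foldl (fun m x => max m x.2.1) p) := by
  induction l with
  | nil => intro acc p; simp [pmRec]
  | cons x rest ih => intro acc p; simp [pmRec, List.foldl_cons, ih]

lemma filters_eq (mx : Int) (l : List (Int × Int × String)) :
    ∀ (k p : Int),
    ((((PySem.List.enumerate (l.zip (pmRec p l)) k).filter (fun q => decide (q.2.1.1 < q.2.2))).map (·.1),
      ((PySem.List.enumerate (l.zip (pmRec p l)) k).filter (fun q => decide (q.2.2 > q.2.1.1))).map (·.1),
      ((PySem.List.enumerate (l.zip (pmRec p l)) k).filter (fun q => decide (q.2.1.1 ≥ q.2.1.2.1))).map (·.1),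
      ((PySem.List.enumerate (l.zip (pmRec p l)) k).filter (fun q => decide (q.2.1.2.1 - q.2.1.1 > mx))).map (·.1),
      ((PySem.List.enumerate (l.zip (pmRec p l)) k).filter (fun q => PySem.Str.strip q.2.1.2.2 == "")).map (·.1))
      : List Int × List Int × List Int × List Int × List Int)
    = specs mx (PySem.List.enumerate l k) p := by
  induction l with
  | nil => intro k p; simp [pmRec, PySem.List.enumerate_nil, specs]
  | cons x rest ih =>
    intro k p
    obtain ⟨s, e', t⟩ := x
    simp only [pmRec, List.zip_cons_cons, PySem.List.enumerate_cons, specs, List.filter_cons]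
    rw [← ih (k + 1) (max p e')]
    by_cases h1 : s < p <;> by_cases h2 : s ≥ e' <;> by_cases h3 : e' - s > mx <;>
      by_cases h4 : (PySem.Str.strip t == "") = true <;>
      simp [h1, h2, h3, h4, gt_iff_lt]

-- ===== VERDICT (by name: the statement is the Claim_ definition above) =====
theorem validate_entries_spec : Claim_equal_validate_entries := by
  intro entries mx _
  show validate_entries entries mx = validate_entries_alt entries mx
  simp only [validate_entries, validate_entries_alt]
  rw [show ((((PySem.Dict.empty.insert "non_monotonic" ([] : List Int)).insert "overlap" []).insert
        "negative_or_zero" []).insert "too_long" []).insert "empty_text" [] = mkD [] [] [] [] [] from rfl,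
     loopA_eq, pm_fold]
  have hB := filters_eq mx entries 0 (-1)
  simp only [Prod.ext_iff] at hB
  obtain ⟨h1, h2, h3, h4, h5⟩ := hB
  simp only [List.nil_append, mkD, ← h1, ← h2, ← h3, ← h4, ← h5]
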